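-- pv_equiv track=rewrite | github.com/nmenezes1994/adventofcode2025 | day11/part2/main.py | count_paths_to_reactor
-- ===== SOURCE A (Python) =====
-- DAC_DEVICE_NAME: str = 'dac'
--
-- FFT_DEVICE_NAME: str = 'fft'
--
-- def count_paths_to_reactor(connections: dict[str, list[str]], current_device: str, known_paths: dict[str, tuple[int, int, int, int]]) -> tuple[int, int, int, int]:
--     if current_device in known_paths:
--         return known_paths[current_device]
--
--     if current_device not in connections:
--         known_paths[current_device] = (1, 0, 0, 0)
--         return known_paths[current_device]
--
--     is_dac: bool = current_device == DAC_DEVICE_NAME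
--     is_fft: bool = current_device == FFT_DEVICE_NAME
--
--     total_paths: int = 0
--     total_valid_paths: int = 0
--     total_paths_with_dac: int = 0
--     total_paths_with_fft: int = 0
--     for output in connections[current_device]:
--         paths, valid_paths, paths_with_dac, paths_with_fft = count_paths_to_reactor(connections, output, known_paths)
--
--         total_paths += paths
--
--         if is_dac:
--             if paths_with_fft > 0:
--                 total_valid_paths += paths_with_fft
--             else:
--                 total_paths_with_dac += paths
--         elif is_fft:
--             if paths_with_dac > 0:
--                 total_valid_paths += paths_with_dac
--             else:
--                 total_paths_with_fft += paths
--         else: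
--             total_valid_paths += valid_paths
--             total_paths_with_dac += paths_with_dac
--             total_paths_with_fft += paths_with_fft
--
--     known_paths[current_device] = (total_paths, total_valid_paths, total_paths_with_dac, total_paths_with_fft)
--
--     return known_paths[current_device]
-- ===== SOURCE B (Python) =====
-- DAC_DEVICE_NAME: str = 'dac'
--
-- FFT_DEVICE_NAME: str = 'fft'
--
--
-- def count_paths_to_reactor(connections: dict[str, list[str]], current_device: str, known_paths: dict[str, tuple[int, int, int, int]]) -> tuple[int, int, int, int]:
--     # Round-based bottom-up DP instead of recursive memoized DFS.
--     # NOTE: unlike A (which memoizes into known_paths in place), B leaves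
--     # known_paths unchanged; only the return value is claimed equal.
--     memo = dict(known_paths)
--     remaining = [node for node in connections if node not in memo]
--     while remaining:
--         progressed = False
--         still = []
--         for node in remaining:
--             is_dac = node == DAC_DEVICE_NAME
--             is_fft = node == FFT_DEVICE_NAME
--             total = (0, 0, 0, 0)
--             ready = True
--             for child in connections[node]:
--                 if child in memo:
--                     value = memo[child]
--                 elif child in connections:
--                     ready = False
--                     break
--                 else:
--                     value = (1, 0, 0, 0)
--                 total = _absorb(is_dac, is_fft, total, value)
--             if ready:
--                 memo[node] = total
--                 progressed = True
--             else:
--                 still.append(node)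
--         if not progressed:
--             break
--         remaining = still
--     if current_device in memo:
--         return memo[current_device]
--     if current_device not in connections:
--         return (1, 0, 0, 0)
--     return memo[current_device]
--
--
-- def _absorb(is_dac: bool, is_fft: bool, acc: tuple[int, int, int, int], value: tuple[int, int, int, int]) -> tuple[int, int, int, int]:
--     tp, tv, td, tf = acc
--     p, vp, pd, pf = value
--     tp += p
--     if is_dac:
--         if pf > 0:
--             return (tp, tv + pf, td, tf)
--         return (tp, tv, td + p, tf)
--     if is_fft:
--         if pd > 0:
--             return (tp, tv + pd, td, tf)
--         return (tp, tv, td, tf + p)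
--     return (tp, tv + vp, td + pd, tf + pf)
-- ===== Notes on version B (the rewrite author's own statement) =====
-- stated objective: alternative
-- what changed: Replaced A's recursive memoized DFS (which mutates known_paths) by an iterative round-based bottom-up DP over a private memo: repeatedly sweep the unresolved connection keys and fill every node whose children are all resolved, then look up current_device.
import Mathlib
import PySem

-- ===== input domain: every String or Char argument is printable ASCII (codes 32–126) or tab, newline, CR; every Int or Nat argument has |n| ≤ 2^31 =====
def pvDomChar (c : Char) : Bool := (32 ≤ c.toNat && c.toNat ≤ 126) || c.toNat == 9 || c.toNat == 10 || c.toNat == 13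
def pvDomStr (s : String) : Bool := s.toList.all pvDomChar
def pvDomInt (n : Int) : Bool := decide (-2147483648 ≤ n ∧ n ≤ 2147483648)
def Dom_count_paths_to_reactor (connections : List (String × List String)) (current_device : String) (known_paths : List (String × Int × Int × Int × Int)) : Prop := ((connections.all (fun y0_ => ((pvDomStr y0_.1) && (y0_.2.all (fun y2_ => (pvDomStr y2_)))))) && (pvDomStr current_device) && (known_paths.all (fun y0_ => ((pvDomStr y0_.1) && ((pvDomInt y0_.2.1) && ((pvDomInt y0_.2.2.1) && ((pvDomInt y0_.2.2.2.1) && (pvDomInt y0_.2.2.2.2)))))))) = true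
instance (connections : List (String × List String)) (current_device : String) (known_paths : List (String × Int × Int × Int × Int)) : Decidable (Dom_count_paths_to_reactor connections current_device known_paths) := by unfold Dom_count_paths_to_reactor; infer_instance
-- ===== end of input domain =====

-- B replaces A's recursive memoized DFS by an iterative round-based bottom-up DP (fill a node once
-- all its children are resolved); only the RETURN value is claimed equal — A memoizes into
-- known_paths in place, B leaves the caller's known_paths untouched.

-- ===== PORT A =====
-- A is recursive with a shared memo dict; the port threads the memo explicitly and uses a fuel
-- parameter (recursion depth bound; never exhausted under Pre_, where A terminates).
mutual
def pvGoA (conns : PySem.Dict String (List String)) (fuel : Nat) (cur : String)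
    (known : PySem.Dict String (Int × Int × Int × Int)) :
    Option ((Int × Int × Int × Int) × PySem.Dict String (Int × Int × Int × Int)) :=
  match fuel with
  | 0 => none
  | fuel + 1 =>
    match known.get? cur with
    | some v => some (v, known)
    | none =>
      match conns.get? cur with
      | none => some ((1, 0, 0, 0), known.insert cur (1, 0, 0, 0))
      | some outputs =>
        let isDac : Bool := cur == "dac"
        let isFft : Bool := cur == "fft"
        match pvGoAFold conns fuel outputs isDac isFft (0, 0, 0, 0) known with
        | none => none
        | some (tot, known') => some (tot, known'.insert cur tot)
termination_by (fuel, 0)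

def pvGoAFold (conns : PySem.Dict String (List String)) (fuel : Nat) (outputs : List String)
    (isDac isFft : Bool) (acc : Int × Int × Int × Int)
    (known : PySem.Dict String (Int × Int × Int × Int)) :
    Option ((Int × Int × Int × Int) × PySem.Dict String (Int × Int × Int × Int)) :=
  match outputs with
  | [] => some (acc, known)
  | out :: rest =>
    match pvGoA conns fuel out known with
    | none => none
    | some (r, known') =>
      -- A's loop body, inline as in the Python
      let totalPaths := acc.1 + r.1
      let acc' :=
        if isDac then
          if r.2.2.2 > 0 then (totalPaths, acc.2.1 + r.2.2.2, acc.2.2.1, acc.2.2.2)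
          else (totalPaths, acc.2.1, acc.2.2.1 + r.1, acc.2.2.2)
        else if isFft then
          if r.2.2.1 > 0 then (totalPaths, acc.2.1 + r.2.2.1, acc.2.2.1, acc.2.2.2)
          else (totalPaths, acc.2.1, acc.2.2.1, acc.2.2.2 + r.1)
        else (totalPaths, acc.2.1 + r.2.1, acc.2.2.1 + r.2.2.1, acc.2.2.2 + r.2.2.2)
      pvGoAFold conns fuel rest isDac isFft acc' known'
termination_by (fuel, outputs.length + 1)
end

-- depth bound: A's recursion stack is a simple path, so #edges + 3 fuel always suffices under Pre_
def pvFuelA (connections : List (String × List String)) : Nat :=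
  (connections.map (fun p => p.2.length)).sum + 3

def count_paths_to_reactor (connections : List (String × List String)) (current_device : String) (known_paths : List (String × Int × Int × Int × Int)) : Int × Int × Int × Int :=
  ((pvGoA (PySem.Dict.mk connections) (pvFuelA connections) current_device
      (PySem.Dict.mk known_paths)).map Prod.fst).getD (0, 0, 0, 0)

-- ===== PORT B =====
def pvAbsorb (isDac isFft : Bool) (acc value : Int × Int × Int × Int) : Int × Int × Int × Int :=
  let tp := acc.1 + value.1
  if isDac then
    if value.2.2.2 > 0 then (tp, acc.2.1 + value.2.2.2, acc.2.2.1, acc.2.2.2)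
    else (tp, acc.2.1, acc.2.2.1 + value.1, acc.2.2.2)
  else if isFft then
    if value.2.2.1 > 0 then (tp, acc.2.1 + value.2.2.1, acc.2.2.1, acc.2.2.2)
    else (tp, acc.2.1, acc.2.2.1, acc.2.2.2 + value.1)
  else (tp, acc.2.1 + value.2.1, acc.2.2.1 + value.2.2.1, acc.2.2.2 + value.2.2.2)

def pvChildVal? (conns : PySem.Dict String (List String))
    (memo : PySem.Dict String (Int × Int × Int × Int)) (child : String) :
    Option (Int × Int × Int × Int) :=
  match memo.get? child with
  | some v => some v
  | none => if conns.contains child then none else some (1, 0, 0, 0)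

def pvTryNode (conns : PySem.Dict String (List String))
    (memo : PySem.Dict String (Int × Int × Int × Int)) (isDac isFft : Bool)
    (children : List String) (acc : Int × Int × Int × Int) : Option (Int × Int × Int × Int) :=
  match children with
  | [] => some acc
  | c :: cs =>
    match pvChildVal? conns memo c with
    | none => none
    | some v => pvTryNode conns memo isDac isFft cs (pvAbsorb isDac isFft acc v)

def pvPass (conns : PySem.Dict String (List String)) (remaining : List String)
    (memo : PySem.Dict String (Int × Int × Int × Int)) :
    PySem.Dict String (Int × Int × Int × Int) × List String × Bool :=
  match remaining with
  | [] => (memo, [], false)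
  | node :: rest =>
    match pvTryNode conns memo (node == "dac") (node == "fft")
        ((conns.get? node).getD []) (0, 0, 0, 0) with
    | some tot =>
      let (m', still, _) := pvPass conns rest (memo.insert node tot)
      (m', still, true)
    | none =>
      let (m', still, prog) := pvPass conns rest memo
      (m', node :: still, prog)

def pvLoop (conns : PySem.Dict String (List String)) (fuel : Nat) (remaining : List String)
    (memo : PySem.Dict String (Int × Int × Int × Int)) :
    PySem.Dict String (Int × Int × Int × Int) :=
  match fuel with
  | 0 => memo
  | fuel + 1 =>
    if remaining.isEmpty then memo
    else
      let (m', still, prog) := pvPass conns remaining memo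
      if prog then pvLoop conns fuel still m' else m'

def count_paths_to_reactor_alt (connections : List (String × List String)) (current_device : String) (known_paths : List (String × Int × Int × Int × Int)) : Int × Int × Int × Int :=
  let cd := PySem.Dict.mk connections
  let memo0 := PySem.Dict.mk known_paths
  let remaining := cd.keys.filter (fun k => !(memo0.contains k))
  let m := pvLoop cd remaining.length remaining memo0
  match m.get? current_device with
  | some v => v
  | none => if cd.contains current_device then (0, 0, 0, 0) else (1, 0, 0, 0)

-- ===== PRECONDITION & SPEC =====
-- graph of the part A explores: a node already in known_paths (or absent from connections) is a
-- stopping point and has no successors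
def pvSucc (connections : List (String × List String)) (known_paths : List (String × Int × Int × Int × Int)) (n : String) : List String :=
  if (PySem.Dict.mk known_paths).contains n then []
  else ((PySem.Dict.mk connections).get? n).getD []

def pvStepSet (connections : List (String × List String)) (known_paths : List (String × Int × Int × Int × Int)) (S : Finset String) : Finset String :=
  S ∪ S.biUnion (fun n => (pvSucc connections known_paths n).toFinset)

def pvReach (connections : List (String × List String)) (known_paths : List (String × Int × Int × Int × Int)) : Nat → Finset String → Finset String
  | 0, S => S
  | k + 1, S => pvStepSet connections known_paths (pvReach connections known_paths k S)

def pvChildrenU (connections : List (String × List String)) : Finset String :=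
  connections.foldr (fun p acc => p.2.toFinset ∪ acc) ∅

def pvUall (connections : List (String × List String)) (current_device : String) : Finset String :=
  insert current_device (pvChildrenU connections)

def pvIter (connections : List (String × List String)) (current_device : String) : Nat :=
  (pvUall connections current_device).card + 1

def pvRset (connections : List (String × List String)) (current_device : String) (known_paths : List (String × Int × Int × Int × Int)) : Finset String :=
  pvReach connections known_paths (pvIter connections current_device) {current_device}

def pvDesc (connections : List (String × List String)) (current_device : String) (known_paths : List (String × Int × Int × Int × Int)) (n : String) : Finset String :=
  pvReach connections known_paths (pvIter connections current_device) (pvSucc connections known_paths n).toFinset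

-- Pre_ excludes exactly (i) the inputs on which A's recursion never terminates (RecursionError):
-- some device reachable from current_device, through nodes not already settled in known_paths,
-- lies on a cycle of that explored region; and (ii) association lists with duplicate keys, which
-- do not represent any Python dict (Python dict keys are unique).
def Pre_count_paths_to_reactor (connections : List (String × List String)) (current_device : String) (known_paths : List (String × Int × Int × Int × Int)) : Prop :=
  (connections.map Prod.fst).Nodup ∧ (known_paths.map Prod.fst).Nodup ∧
    ∀ n ∈ pvRset connections current_device known_paths,
      n ∉ pvDesc connections current_device known_paths n

instance (connections : List (String × List String)) (current_device : String) (known_paths : List (String × Int × Int × Int × Int)) : Decidable (Pre_count_paths_to_reactor connections current_device known_paths) := by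
  unfold Pre_count_paths_to_reactor; infer_instance

def pvWitness_count_paths_to_reactor : (List (String × List String)) × String × (List (String × Int × Int × Int × Int)) :=
  ([("a", ["b", "dac"]), ("dac", ["b"])], "a", [])

def Spec_count_paths_to_reactor (connections : List (String × List String)) (current_device : String) (known_paths : List (String × Int × Int × Int × Int)) (out : Int × Int × Int × Int) : Prop := out = count_paths_to_reactor_alt connections current_device known_paths
instance (connections : List (String × List String)) (current_device : String) (known_paths : List (String × Int × Int × Int × Int)) (out : Int × Int × Int × Int) : Decidable (Spec_count_paths_to_reactor connections current_device known_paths out) := by unfold Spec_count_paths_to_reactor; infer_instance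

-- ===== CLAIM (what is proved, stated in full; the proofs are below) =====
def Claim_equal_count_paths_to_reactor : Prop := ∀ (connections : List (String × List String)) (current_device : String) (known_paths : List (String × Int × Int × Int × Int)), Dom_count_paths_to_reactor connections current_device known_paths → Pre_count_paths_to_reactor connections current_device known_paths → Spec_count_paths_to_reactor connections current_device known_paths (count_paths_to_reactor connections current_device known_paths)

-- ===== LEMMAS AND PROOFS =====

-- size of a node's explored descendant set: the termination measure of the proofs
def pvMu (connections : List (String × List String)) (current_device : String) (known_paths : List (String × Int × Int × Int × Int)) (n : String) : Nat :=
  (pvDesc connections current_device known_paths n).card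


-- ---- graph facts about the explored region ----
theorem pv_subset_step (C : List (String × List String)) (K : List (String × Int × Int × Int × Int)) (S : Finset String) : S ⊆ pvStepSet C K S :=
  Finset.subset_union_left

theorem pv_step_mono (C : List (String × List String)) (K : List (String × Int × Int × Int × Int)) {S T : Finset String} (h : S ⊆ T) : pvStepSet C K S ⊆ pvStepSet C K T :=
  Finset.union_subset_union h (Finset.biUnion_subset_biUnion_of_subset_left _ h)

theorem pv_reach_extensive (C : List (String × List String)) (K : List (String × Int × Int × Int × Int)) (k : Nat) (S : Finset String) : S ⊆ pvReach C K k S := by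
  induction k with
  | zero => simp [pvReach]
  | succ k ih => exact ih.trans (pv_subset_step C K _)

theorem pv_reach_closed (C : List (String × List String)) (K : List (String × Int × Int × Int × Int)) (k : Nat) {S T : Finset String} (hT : pvStepSet C K T ⊆ T) (h : S ⊆ T) : pvReach C K k S ⊆ T := by
  induction k with
  | zero => simpa [pvReach]
  | succ k ih => exact (pv_step_mono C K ih).trans hT

theorem pv_reach_stable (C : List (String × List String)) (K : List (String × Int × Int × Int × Int)) {k : Nat} {S : Finset String} (h : pvReach C K (k + 1) S = pvReach C K k S) : ∀ j, k ≤ j → pvReach C K j S = pvReach C K k S := by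
  intro j hj
  induction j, hj using Nat.le_induction with
  | base => rfl
  | succ j hj ih => show pvStepSet C K (pvReach C K j S) = _ ; rw [ih]; exact h

theorem pv_mem_childrenU (C : List (String × List String)) {p : String × List String} (hp : p ∈ C) : p.2.toFinset ⊆ pvChildrenU C := by
  induction C with
  | nil => cases hp
  | cons q rest ih =>
    rcases List.mem_cons.1 hp with rfl | hp
    · show p.2.toFinset ⊆ pvChildrenU (p :: rest)
      unfold pvChildrenU
      simp only [List.foldr_cons]
      exact Finset.subset_union_left
    · refine (ih hp).trans ?_
      show pvChildrenU rest ⊆ pvChildrenU (q :: rest)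
      unfold pvChildrenU
      simp only [List.foldr_cons]
      exact Finset.subset_union_right

theorem pv_succ_subset_childrenU (C : List (String × List String)) (K : List (String × Int × Int × Int × Int)) (n : String) : (pvSucc C K n).toFinset ⊆ pvChildrenU C := by
  unfold pvSucc
  split
  · simp
  · cases hc : (PySem.Dict.mk C).get? n with
    | none => simp
    | some cs =>
      have hmem : (n, cs) ∈ C := PySem.Dict.mem_items_of_get?_eq_some (d := PySem.Dict.mk C) hc
      simpa [hc] using pv_mem_childrenU C hmem

theorem pv_step_in_U (C : List (String × List String)) (cur : String) (K : List (String × Int × Int × Int × Int)) {S : Finset String} (h : S ⊆ pvUall C cur) : pvStepSet C K S ⊆ pvUall C cur := by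
  refine Finset.union_subset h (Finset.biUnion_subset.2 ?_)
  intro n _
  exact (pv_succ_subset_childrenU C K n).trans (Finset.subset_insert _ _)

theorem pv_reach_in_U (C : List (String × List String)) (cur : String) (K : List (String × Int × Int × Int × Int)) (k : Nat) {S : Finset String} (h : S ⊆ pvUall C cur) : pvReach C K k S ⊆ pvUall C cur := by
  induction k with
  | zero => simpa [pvReach]
  | succ k ih => exact pv_step_in_U C cur K ih

theorem pv_exists_fix (C : List (String × List String)) (cur : String) (K : List (String × Int × Int × Int × Int)) {S : Finset String} (h : S ⊆ pvUall C cur) : ∃ k ≤ (pvUall C cur).card, pvReach C K (k + 1) S = pvReach C K k S := by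
  by_contra hne
  push Not at hne
  have grow : ∀ k, k ≤ (pvUall C cur).card + 1 → k ≤ (pvReach C K k S).card := by
    intro k
    induction k with
    | zero => omega
    | succ k ih =>
      intro hk
      have hsub : pvReach C K k S ⊆ pvReach C K (k + 1) S := pv_subset_step C K _
      have hssub : pvReach C K k S ⊂ pvReach C K (k + 1) S :=
        hsub.ssubset_of_ne (fun he => hne k (by omega) he.symm)
      have := Finset.card_lt_card hssub
      have := ih (by omega)
      omega
  have h1 := grow ((pvUall C cur).card + 1) le_rfl
  have h2 : (pvReach C K ((pvUall C cur).card + 1) S).card ≤ (pvUall C cur).card :=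
    Finset.card_le_card (pv_reach_in_U C cur K _ h)
  omega

theorem pv_step_reach_iter (C : List (String × List String)) (cur : String) (K : List (String × Int × Int × Int × Int)) {S : Finset String} (h : S ⊆ pvUall C cur) : pvStepSet C K (pvReach C K (pvIter C cur) S) ⊆ pvReach C K (pvIter C cur) S := by
  obtain ⟨k, hk, hfix⟩ := pv_exists_fix C cur K h
  have h1 : pvReach C K (pvIter C cur) S = pvReach C K k S :=
    pv_reach_stable C K hfix _ (by unfold pvIter; omega)
  have h2 : pvReach C K (k + 1) S = pvReach C K k S := hfix
  rw [h1]
  calc pvStepSet C K (pvReach C K k S) = pvReach C K (k + 1) S := rfl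
    _ = pvReach C K k S := h2
    _ ⊆ _ := Finset.Subset.refl _

theorem pv_succ_closed (C : List (String × List String)) (cur : String) (K : List (String × Int × Int × Int × Int)) {S : Finset String} (h : S ⊆ pvUall C cur) {x : String} (hx : x ∈ pvReach C K (pvIter C cur) S) {c : String} (hc : c ∈ pvSucc C K x) : c ∈ pvReach C K (pvIter C cur) S := by
  refine pv_step_reach_iter C cur K h ?_
  refine Finset.mem_union_right _ (Finset.mem_biUnion.2 ⟨x, hx, ?_⟩)
  simpa using hc

theorem pv_singleton_in_U (C : List (String × List String)) (cur : String) : ({cur} : Finset String) ⊆ pvUall C cur := by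
  simp [pvUall]

theorem pv_succS_in_U (C : List (String × List String)) (cur : String) (K : List (String × Int × Int × Int × Int)) (n : String) : (pvSucc C K n).toFinset ⊆ pvUall C cur :=
  (pv_succ_subset_childrenU C K n).trans (Finset.subset_insert _ _)

theorem pv_R_self (C : List (String × List String)) (cur : String) (K : List (String × Int × Int × Int × Int)) : cur ∈ pvRset C cur K :=
  pv_reach_extensive C K _ _ (Finset.mem_singleton_self cur)

theorem pv_R_closed (C : List (String × List String)) (cur : String) (K : List (String × Int × Int × Int × Int)) {n c : String} (hn : n ∈ pvRset C cur K) (hc : c ∈ pvSucc C K n) : c ∈ pvRset C cur K :=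
  pv_succ_closed C cur K (pv_singleton_in_U C cur) hn hc

theorem pv_desc_mem (C : List (String × List String)) (cur : String) (K : List (String × Int × Int × Int × Int)) {n c : String} (hc : c ∈ pvSucc C K n) : c ∈ pvDesc C cur K n :=
  pv_reach_extensive C K _ _ (by simpa using hc)

theorem pv_desc_sub (C : List (String × List String)) (cur : String) (K : List (String × Int × Int × Int × Int)) {n c : String} (hc : c ∈ pvSucc C K n) : pvDesc C cur K c ⊆ pvDesc C cur K n := by
  refine pv_reach_closed C K _ (pv_step_reach_iter C cur K (pv_succS_in_U C cur K n)) ?_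
  intro x hx
  exact pv_succ_closed C cur K (pv_succS_in_U C cur K n) (pv_desc_mem C cur K hc) (by simpa using hx)

theorem pv_mu_lt (C : List (String × List String)) (cur : String) (K : List (String × Int × Int × Int × Int)) (pre : Pre_count_paths_to_reactor C cur K) {n c : String} (hn : n ∈ pvRset C cur K) (hc : c ∈ pvSucc C K n) : pvMu C cur K c < pvMu C cur K n := by
  refine Finset.card_lt_card ⟨pv_desc_sub C cur K hc, fun hsub => ?_⟩
  exact pre.2.2 c (pv_R_closed C cur K hn hc) (hsub (pv_desc_mem C cur K hc))

theorem pv_mu_le (C : List (String × List String)) (cur : String) (K : List (String × Int × Int × Int × Int)) (n : String) : pvMu C cur K n ≤ (pvUall C cur).card :=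
  Finset.card_le_card (pv_reach_in_U C cur K _ (pv_succS_in_U C cur K n))

theorem pv_card_U_le (C : List (String × List String)) (cur : String) : (pvUall C cur).card ≤ (C.map (fun p => p.2.length)).sum + 1 := by
  unfold pvUall
  refine (Finset.card_insert_le _ _).trans ?_
  have : (pvChildrenU C).card ≤ (C.map (fun p => p.2.length)).sum := by
    induction C with
    | nil => simp [pvChildrenU]
    | cons p rest ih =>
      have h1 : (pvChildrenU (p :: rest)).card ≤ p.2.toFinset.card + (pvChildrenU rest).card := by
        simpa [pvChildrenU] using Finset.card_union_le p.2.toFinset (pvChildrenU rest)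
      have h2 : p.2.toFinset.card ≤ p.2.length := p.2.toFinset_card_le
      simp only [List.map_cons, List.sum_cons]
      omega
  omega

-- ---- the value a node denotes (fuel-indexed; stable once the fuel exceeds the node's depth) ----
def pvValF (C : List (String × List String)) (K : List (String × Int × Int × Int × Int)) : Nat → String → Int × Int × Int × Int
  | 0, _ => (0, 0, 0, 0)
  | f + 1, n =>
    match (PySem.Dict.mk K).get? n with
    | some v => v
    | none =>
      match (PySem.Dict.mk C).get? n with
      | none => (1, 0, 0, 0)
      | some cs => cs.foldl (fun acc c => pvAbsorb (n == "dac") (n == "fft") acc (pvValF C K f c)) (0, 0, 0, 0)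

def pvVal (C : List (String × List String)) (cur : String) (K : List (String × Int × Int × Int × Int)) (n : String) : Int × Int × Int × Int :=
  pvValF C K (pvIter C cur) n

theorem pv_succ_eq_children (C : List (String × List String)) (K : List (String × Int × Int × Int × Int)) {n : String} {cs : List String} (hk : (PySem.Dict.mk K).get? n = none) (hc : (PySem.Dict.mk C).get? n = some cs) : pvSucc C K n = cs := by
  simp [pvSucc, PySem.Dict.contains_eq_isSome_get?, hk, hc]

theorem pv_val_stable (C : List (String × List String)) (cur : String) (K : List (String × Int × Int × Int × Int)) (pre : Pre_count_paths_to_reactor C cur K) : ∀ F G n, n ∈ pvRset C cur K → pvMu C cur K n + 1 ≤ F → pvMu C cur K n + 1 ≤ G → pvValF C K F n = pvValF C K G n := by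
  intro F
  induction F with
  | zero => intro G n _ hF _; omega
  | succ F ih =>
    intro G n hn hF hG
    cases G with
    | zero => omega
    | succ G =>
      show pvValF C K (F + 1) n = pvValF C K (G + 1) n
      simp only [pvValF]
      cases hk : (PySem.Dict.mk K).get? n with
      | some v => rfl
      | none =>
        cases hc : (PySem.Dict.mk C).get? n with
        | none => rfl
        | some cs =>
          simp only []
          refine PySem.List.foldl_congr_mem cs _ _ _ ?_
          intro acc c hcmem
          have hsucc : c ∈ pvSucc C K n := by rw [pv_succ_eq_children C K hk hc]; exact hcmem
          have hcR : c ∈ pvRset C cur K := pv_R_closed C cur K hn hsucc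
          have hlt : pvMu C cur K c < pvMu C cur K n := pv_mu_lt C cur K pre hn hsucc
          rw [ih G c hcR (by omega) (by omega)]

theorem pv_val_kp (C : List (String × List String)) (cur : String) (K : List (String × Int × Int × Int × Int)) {n : String} {v : Int × Int × Int × Int} (hk : (PySem.Dict.mk K).get? n = some v) : pvVal C cur K n = v := by
  show pvValF C K (pvIter C cur) n = v
  unfold pvIter
  simp [pvValF, hk]

theorem pv_val_leaf (C : List (String × List String)) (cur : String) (K : List (String × Int × Int × Int × Int)) {n : String} (hk : (PySem.Dict.mk K).get? n = none) (hc : (PySem.Dict.mk C).get? n = none) : pvVal C cur K n = (1, 0, 0, 0) := by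
  show pvValF C K (pvIter C cur) n = _
  unfold pvIter
  simp [pvValF, hk, hc]

theorem pv_val_node (C : List (String × List String)) (cur : String) (K : List (String × Int × Int × Int × Int)) (pre : Pre_count_paths_to_reactor C cur K) {n : String} {cs : List String} (hn : n ∈ pvRset C cur K) (hk : (PySem.Dict.mk K).get? n = none) (hc : (PySem.Dict.mk C).get? n = some cs) : pvVal C cur K n = cs.foldl (fun acc c => pvAbsorb (n == "dac") (n == "fft") acc (pvVal C cur K c)) (0, 0, 0, 0) := by
  show pvValF C K (pvIter C cur) n = _
  unfold pvIter
  simp only [pvValF, hk, hc]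
  refine PySem.List.foldl_congr_mem cs _ _ _ ?_
  intro acc c hcmem
  have hsucc : c ∈ pvSucc C K n := by rw [pv_succ_eq_children C K hk hc]; exact hcmem
  have hcR : c ∈ pvRset C cur K := pv_R_closed C cur K hn hsucc
  have hlt : pvMu C cur K c < pvMu C cur K n := pv_mu_lt C cur K pre hn hsucc
  have hle : pvMu C cur K n ≤ (pvUall C cur).card := pv_mu_le C cur K n
  rw [pv_val_stable C cur K pre ((pvUall C cur).card) (pvIter C cur) c hcR (by omega) (by unfold pvIter; omega)]
  rfl

-- ---- the memo invariant shared by both ports ----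
def pvMono (K : List (String × Int × Int × Int × Int)) (m : PySem.Dict String (Int × Int × Int × Int)) : Prop :=
  ∀ k v, (PySem.Dict.mk K).get? k = some v → m.get? k = some v

def pvGood (C : List (String × List String)) (cur : String) (K : List (String × Int × Int × Int × Int)) (m : PySem.Dict String (Int × Int × Int × Int)) : Prop :=
  pvMono K m ∧ ∀ k v, m.get? k = some v → (PySem.Dict.mk K).get? k = some v ∨ (k ∈ pvRset C cur K → v = pvVal C cur K k)

theorem pv_mono_none (K : List (String × Int × Int × Int × Int)) {m : PySem.Dict String (Int × Int × Int × Int)} (hm : pvMono K m) {k : String} (hk : m.get? k = none) : (PySem.Dict.mk K).get? k = none := by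
  cases h : (PySem.Dict.mk K).get? k with
  | none => rfl
  | some v => rw [hm k v h] at hk; cases hk

theorem pv_good_val (C : List (String × List String)) (cur : String) (K : List (String × Int × Int × Int × Int)) {m : PySem.Dict String (Int × Int × Int × Int)} (good : pvGood C cur K m) {k : String} {v : Int × Int × Int × Int} (hm : m.get? k = some v) (hk : k ∈ pvRset C cur K) : v = pvVal C cur K k := by
  rcases good.2 k v hm with h | h
  · exact (pv_val_kp C cur K h).symm
  · exact h hk

theorem pv_good_insert (C : List (String × List String)) (cur : String) (K : List (String × Int × Int × Int × Int)) {m : PySem.Dict String (Int × Int × Int × Int)} (good : pvGood C cur K m) {n : String} {v : Int × Int × Int × Int} (hkd : (PySem.Dict.mk K).get? n = none) (hv : n ∈ pvRset C cur K → v = pvVal C cur K n) : pvGood C cur K (m.insert n v) := by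
  constructor
  · intro k w hk
    have hne : k ≠ n := fun he => by rw [he, hkd] at hk; cases hk
    rw [PySem.Dict.get?_insert]
    simp [hne]
    exact good.1 k w hk
  · intro k w hk
    rw [PySem.Dict.get?_insert] at hk
    by_cases he : k = n
    · simp [he] at hk
      subst he hk
      exact Or.inr hv
    · simp [he] at hk
      exact good.2 k w hk

-- ---- port A computes pvVal ----
theorem pvFold_correct (C : List (String × List String)) (cur : String) (K : List (String × Int × Int × Int × Int)) (F : Nat)
    (hP : ∀ n m, n ∈ pvRset C cur K → pvMu C cur K n + 2 ≤ F → pvGood C cur K m →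
      ∃ m', pvGoA (PySem.Dict.mk C) F n m = some (pvVal C cur K n, m') ∧ pvGood C cur K m') :
    ∀ cs d f acc m, (∀ c ∈ cs, c ∈ pvRset C cur K ∧ pvMu C cur K c + 2 ≤ F) → pvGood C cur K m →
    ∃ m', pvGoAFold (PySem.Dict.mk C) F cs d f acc m =
        some (cs.foldl (fun a c => pvAbsorb d f a (pvVal C cur K c)) acc, m') ∧ pvGood C cur K m' := by
  intro cs
  induction cs with
  | nil =>
    intro d f acc m _ good
    exact ⟨m, by simp [pvGoAFold], good⟩
  | cons c rest ih =>
    intro d f acc m hcs good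
    obtain ⟨m1, h1, good1⟩ := hP c m (hcs c (by simp)).1 (hcs c (by simp)).2 good
    obtain ⟨m2, h2, good2⟩ := ih d f (pvAbsorb d f acc (pvVal C cur K c)) m1
      (fun x hx => hcs x (by simp [hx])) good1
    refine ⟨m2, ?_, good2⟩
    conv_lhs => rw [pvGoAFold]
    rw [h1]
    exact h2

theorem pvGoA_correct (C : List (String × List String)) (cur : String) (K : List (String × Int × Int × Int × Int)) (pre : Pre_count_paths_to_reactor C cur K) :
    ∀ F n m, n ∈ pvRset C cur K → pvMu C cur K n + 2 ≤ F → pvGood C cur K m →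
      ∃ m', pvGoA (PySem.Dict.mk C) F n m = some (pvVal C cur K n, m') ∧ pvGood C cur K m' := by
  intro F
  induction F with
  | zero => intro n m _ h _; omega
  | succ F ih =>
    intro n m hn hF good
    conv in pvGoA _ _ _ _ => rw [pvGoA]
    cases hm : m.get? n with
    | some v =>
      refine ⟨m, ?_, good⟩
      rw [pv_good_val C cur K good hm hn]
    | none =>
      have hkd : (PySem.Dict.mk K).get? n = none := pv_mono_none K good.1 hm
      cases hc : (PySem.Dict.mk C).get? n with
      | none =>
        refine ⟨m.insert n (1, 0, 0, 0), ?_, ?_⟩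
        · rw [pv_val_leaf C cur K hkd hc]
        · exact pv_good_insert C cur K good hkd (fun _ => (pv_val_leaf C cur K hkd hc).symm)
      | some cs =>
        have hsucc : pvSucc C K n = cs := pv_succ_eq_children C K hkd hc
        have hcs : ∀ c ∈ cs, c ∈ pvRset C cur K ∧ pvMu C cur K c + 2 ≤ F := by
          intro c hcm
          have hs : c ∈ pvSucc C K n := by rw [hsucc]; exact hcm
          exact ⟨pv_R_closed C cur K hn hs, by have := pv_mu_lt C cur K pre hn hs; omega⟩
        obtain ⟨m', hfold, good'⟩ := pvFold_correct C cur K F ih cs (n == "dac") (n == "fft") (0, 0, 0, 0) m hcs good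
        dsimp only
        rw [hfold]
        refine ⟨m'.insert n (pvVal C cur K n), ?_, ?_⟩
        · rw [pv_val_node C cur K pre hn hkd hc]
        · exact pv_good_insert C cur K good' hkd (fun _ => rfl)

theorem pvA_eq_val (C : List (String × List String)) (cur : String) (K : List (String × Int × Int × Int × Int)) (pre : Pre_count_paths_to_reactor C cur K) :
    count_paths_to_reactor C cur K = pvVal C cur K cur := by
  have good0 : pvGood C cur K (PySem.Dict.mk K) := ⟨fun k v h => h, fun k v h => Or.inl h⟩
  have hfuel : pvMu C cur K cur + 2 ≤ pvFuelA C := by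
    have h1 := pv_mu_le C cur K cur
    have h2 := pv_card_U_le C cur
    unfold pvFuelA
    omega
  obtain ⟨m', h, _⟩ := pvGoA_correct C cur K pre (pvFuelA C) cur (PySem.Dict.mk K) (pv_R_self C cur K) hfuel good0
  unfold count_paths_to_reactor
  rw [h]
  rfl

-- ---- port B computes pvVal ----
def pvCvD (m : PySem.Dict String (Int × Int × Int × Int)) (c : String) : Int × Int × Int × Int :=
  match m.get? c with
  | some v => v
  | none => (1, 0, 0, 0)

def pvReadyM (C : List (String × List String)) (m : PySem.Dict String (Int × Int × Int × Int)) (x : String) : Prop :=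
  ∀ c ∈ ((PySem.Dict.mk C).get? x).getD [], pvChildVal? (PySem.Dict.mk C) m c ≠ none

theorem pv_try_some (C : List (String × List String)) (m : PySem.Dict String (Int × Int × Int × Int)) (d f : Bool) :
    ∀ cs acc tot, pvTryNode (PySem.Dict.mk C) m d f cs acc = some tot →
      tot = cs.foldl (fun a c => pvAbsorb d f a (pvCvD m c)) acc ∧
      ∀ c ∈ cs, pvChildVal? (PySem.Dict.mk C) m c ≠ none := by
  intro cs
  induction cs with
  | nil => intro acc tot h; simp [pvTryNode] at h; simp [h.symm]
  | cons c rest ih =>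
    intro acc tot h
    rw [pvTryNode] at h
    cases hcv : pvChildVal? (PySem.Dict.mk C) m c with
    | none => rw [hcv] at h; cases h
    | some v =>
      rw [hcv] at h
      have hv : v = pvCvD m c := by
        unfold pvCvD
        cases hm : m.get? c with
        | some w =>
          simp [pvChildVal?, hm] at hcv
          simp [hcv]
        | none =>
          by_cases hb : (PySem.Dict.mk C).contains c = true
          · simp [pvChildVal?, hm, hb] at hcv
          · simp [pvChildVal?, hm, hb] at hcv
            simp [hcv.symm]
      obtain ⟨h1, h2⟩ := ih _ _ h
      refine ⟨by rw [h1, hv, List.foldl_cons], ?_⟩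
      intro x hx
      rcases List.mem_cons.1 hx with rfl | hx
      · rw [hcv]; simp
      · exact h2 x hx

theorem pv_try_ready (C : List (String × List String)) (m : PySem.Dict String (Int × Int × Int × Int)) (d f : Bool) :
    ∀ cs acc, (∀ c ∈ cs, pvChildVal? (PySem.Dict.mk C) m c ≠ none) →
      ∃ tot, pvTryNode (PySem.Dict.mk C) m d f cs acc = some tot := by
  intro cs
  induction cs with
  | nil => intro acc _; exact ⟨acc, rfl⟩
  | cons c rest ih =>
    intro acc hready
    cases hcv : pvChildVal? (PySem.Dict.mk C) m c with
    | none => exact absurd hcv (hready c (by simp))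
    | some v =>
      obtain ⟨tot, h⟩ := ih (pvAbsorb d f acc v) (fun x hx => hready x (by simp [hx]))
      exact ⟨tot, by rw [pvTryNode, hcv]; exact h⟩

theorem pv_childval_mono (C : List (String × List String)) {m m' : PySem.Dict String (Int × Int × Int × Int)} (hmm : ∀ k v, m.get? k = some v → m'.get? k = some v) {c : String} (h : pvChildVal? (PySem.Dict.mk C) m c ≠ none) : pvChildVal? (PySem.Dict.mk C) m' c ≠ none := by
  unfold pvChildVal? at h ⊢
  cases hm : m.get? c with
  | some v => rw [hmm c v hm]; simp
  | none =>
    rw [hm] at h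
    by_cases hb : (PySem.Dict.mk C).contains c = true
    · simp [hb] at h
    · cases hm' : m'.get? c <;> simp [hb]

theorem pv_fill_val (C : List (String × List String)) (cur : String) (K : List (String × Int × Int × Int × Int)) (pre : Pre_count_paths_to_reactor C cur K) {m : PySem.Dict String (Int × Int × Int × Int)} (good : pvGood C cur K m) {n : String} {cs : List String} {tot : Int × Int × Int × Int} (hmn : m.get? n = none) (hc : (PySem.Dict.mk C).get? n = some cs) (htry : pvTryNode (PySem.Dict.mk C) m (n == "dac") (n == "fft") cs (0, 0, 0, 0) = some tot) (hn : n ∈ pvRset C cur K) : tot = pvVal C cur K n := by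
  have hkd : (PySem.Dict.mk K).get? n = none := pv_mono_none K good.1 hmn
  have hsucc : pvSucc C K n = cs := pv_succ_eq_children C K hkd hc
  obtain ⟨h1, h2⟩ := pv_try_some C m _ _ cs (0, 0, 0, 0) tot htry
  rw [pv_val_node C cur K pre hn hkd hc, h1]
  refine PySem.List.foldl_congr_mem cs _ _ _ ?_
  intro acc c hcm
  have hsc : c ∈ pvSucc C K n := by rw [hsucc]; exact hcm
  have hcR : c ∈ pvRset C cur K := pv_R_closed C cur K hn hsc
  unfold pvCvD
  cases hm : m.get? c with
  | some v => rw [pv_good_val C cur K good hm hcR]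
  | none =>
    have := h2 c hcm
    unfold pvChildVal? at this
    rw [hm] at this
    have hcc : (PySem.Dict.mk C).get? c = none := by
      by_contra hne
      have : (PySem.Dict.mk C).contains c = true := by
        rw [PySem.Dict.contains_eq_isSome_get?]
        cases h : (PySem.Dict.mk C).get? c
        · exact absurd h hne
        · simp
      simp [this] at *
    have hkc : (PySem.Dict.mk K).get? c = none := pv_mono_none K good.1 hm
    rw [pv_val_leaf C cur K hkc hcc]

theorem pvPass_correct (C : List (String × List String)) (cur : String) (K : List (String × Int × Int × Int × Int)) (pre : Pre_count_paths_to_reactor C cur K) :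
    ∀ (rem : List String) (m : PySem.Dict String (Int × Int × Int × Int)),
      pvGood C cur K m → rem.Nodup →
      (∀ x ∈ rem, m.get? x = none ∧ (PySem.Dict.mk C).get? x ≠ none) →
      ∀ m' still prog, pvPass (PySem.Dict.mk C) rem m = (m', still, prog) →
        (∀ k v, m.get? k = some v → m'.get? k = some v) ∧
        pvGood C cur K m' ∧
        still.Sublist rem ∧
        (∀ k, k ∉ rem → m'.get? k = m.get? k) ∧
        (∀ x ∈ rem, x ∉ still → m'.get? x ≠ none) ∧
        (∀ x ∈ still, m'.get? x = none) ∧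
        (prog = false → m' = m ∧ still = rem) ∧
        (prog = true → still.length < rem.length) ∧
        (∀ x ∈ rem, pvReadyM C m x → x ∉ still) := by
  intro rem
  induction rem with
  | nil =>
    intro m good _ _ m' still prog h
    rw [pvPass] at h
    cases h
    refine ⟨fun k v hv => hv, good, List.Sublist.refl _, fun k _ => rfl, by simp, by simp, fun _ => ⟨rfl, rfl⟩, by simp, by simp⟩
  | cons node rest ih =>
    intro m good hnd hkeys m' still prog h
    have hmn : m.get? node = none := (hkeys node (by simp)).1
    have hkd : (PySem.Dict.mk K).get? node = none := pv_mono_none K good.1 hmn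
    obtain ⟨cs, hc⟩ : ∃ cs, (PySem.Dict.mk C).get? node = some cs := by
      cases hcc : (PySem.Dict.mk C).get? node with
      | none => exact absurd hcc (hkeys node (by simp)).2
      | some cs => exact ⟨cs, rfl⟩
    have hnodnr : node ∉ rest := (List.nodup_cons.1 hnd).1
    have hndr : rest.Nodup := (List.nodup_cons.1 hnd).2
    rw [pvPass] at h
    cases htry : pvTryNode (PySem.Dict.mk C) m (node == "dac") (node == "fft") ((PySem.Dict.mk C).get? node |>.getD []) (0, 0, 0, 0) with
    | some tot =>
      rw [htry] at h
      dsimp only at h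
      rcases hpp : pvPass (PySem.Dict.mk C) rest (m.insert node tot) with ⟨m2, still2, prog2⟩
      rw [hpp] at h
      dsimp only at h
      cases h
      have htry' : pvTryNode (PySem.Dict.mk C) m (node == "dac") (node == "fft") cs (0, 0, 0, 0) = some tot := by
        rw [hc] at htry; exact htry
      have good1 : pvGood C cur K (m.insert node tot) :=
        pv_good_insert C cur K good hkd (fun hn => pv_fill_val C cur K pre good hmn hc htry' hn)
      have ins_mono : ∀ k v, m.get? k = some v → (m.insert node tot).get? k = some v := by
        intro k v hv
        have hne : k ≠ node := fun he => by rw [he, hmn] at hv; cases hv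
        rw [PySem.Dict.get?_insert]; simp [hne]; exact hv
      have hkeys1 : ∀ x ∈ rest, (m.insert node tot).get? x = none ∧ (PySem.Dict.mk C).get? x ≠ none := by
        intro x hx
        have hne : x ≠ node := fun he => hnodnr (he ▸ hx)
        rw [PySem.Dict.get?_insert]
        simp only [hne, if_false]
        exact hkeys x (by simp [hx])
      obtain ⟨ih1, ih2, ih3, ih4, ih5, ih6, ih7, ih8, ih9⟩ := ih (m.insert node tot) good1 hndr hkeys1 m' still prog2 hpp
      refine ⟨?_, ih2, ih3.cons _, ?_, ?_, ih6, ?_, ?_, ?_⟩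
      · intro k v hv; exact ih1 k v (ins_mono k v hv)
      · intro k hk
        rw [ih4 k (fun hx => hk (by simp [hx]))]
        rw [PySem.Dict.get?_insert]
        have hne : k ≠ node := fun he => hk (by simp [he])
        simp [hne]
      · intro x hx hxs
        rcases List.mem_cons.1 hx with rfl | hx2
        · have hx1 : (m.insert x tot).get? x = some tot := PySem.Dict.get?_insert_self _ _ _
          rw [ih1 x tot hx1]; simp
        · exact ih5 x hx2 hxs
      · intro hpf; simp at hpf
      · intro _
        have := ih3.length_le
        simp only [List.length_cons]
        omega
      · intro x hx hready
        rcases List.mem_cons.1 hx with rfl | hx2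
        · intro hmem
          exact hnodnr (ih3.subset hmem)
        · refine ih9 x hx2 ?_
          intro c hcm
          exact pv_childval_mono C ins_mono (hready c hcm)
    | none =>
      rw [htry] at h
      dsimp only at h
      rcases hpp : pvPass (PySem.Dict.mk C) rest m with ⟨m2, still2, prog2⟩
      rw [hpp] at h
      dsimp only at h
      cases h
      obtain ⟨ih1, ih2, ih3, ih4, ih5, ih6, ih7, ih8, ih9⟩ := ih m good hndr (fun x hx => hkeys x (by simp [hx])) m' still2 prog hpp
      refine ⟨ih1, ih2, ih3.cons₂ _, ?_, ?_, ?_, ?_, ?_, ?_⟩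
      · intro k hk; exact ih4 k (fun hx => hk (by simp [hx]))
      · intro x hx hns
        rcases List.mem_cons.1 hx with rfl | hx2
        · exact absurd (by simp) hns
        · exact ih5 x hx2 (fun hs => hns (by simp [hs]))
      · intro x hx
        rcases List.mem_cons.1 hx with rfl | hx2
        · rw [ih4 x hnodnr]; exact hmn
        · exact ih6 x hx2
      · intro hpf
        obtain ⟨he, hs⟩ := ih7 hpf
        exact ⟨he, by rw [hs]⟩
      · intro hpt
        have := ih8 hpt
        simp only [List.length_cons]
        omega
      · intro x hx hready
        rcases List.mem_cons.1 hx with rfl | hx2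
        · exfalso
          obtain ⟨tot, htot⟩ := pv_try_ready C m (x == "dac") (x == "fft") ((PySem.Dict.mk C).get? x |>.getD []) (0, 0, 0, 0) hready
          rw [htot] at htry; cases htry
        · intro hmem
          rcases List.mem_cons.1 hmem with rfl | hmem2
          · exact hnodnr hx2
          · exact ih9 x hx2 hready hmem2

theorem pvLoop_correct (C : List (String × List String)) (cur : String) (K : List (String × Int × Int × Int × Int)) (pre : Pre_count_paths_to_reactor C cur K) :
    ∀ (fuel : Nat) (rem : List String) (m : PySem.Dict String (Int × Int × Int × Int)),
      pvGood C cur K m → rem.Nodup →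
      (∀ x ∈ rem, m.get? x = none ∧ (PySem.Dict.mk C).get? x ≠ none) →
      rem.length ≤ fuel →
      (∀ k, (PySem.Dict.mk C).get? k ≠ none → m.get? k = none → k ∈ rem) →
      pvGood C cur K (pvLoop (PySem.Dict.mk C) fuel rem m) ∧
      ∀ x ∈ pvRset C cur K, (PySem.Dict.mk C).get? x ≠ none →
        (pvLoop (PySem.Dict.mk C) fuel rem m).get? x ≠ none := by
  intro fuel
  induction fuel with
  | zero =>
    intro rem m good hnd hkeys hlen hcov
    have hrem : rem = [] := List.eq_nil_of_length_eq_zero (by omega)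
    subst hrem
    rw [pvLoop]
    exact ⟨good, fun x _ hx hnone => by cases hcov x hx hnone⟩
  | succ fuel ih =>
    intro rem m good hnd hkeys hlen hcov
    rw [pvLoop]
    by_cases hre : rem.isEmpty
    · rw [if_pos hre]
      have hrem : rem = [] := List.isEmpty_iff.1 hre
      subst hrem
      exact ⟨good, fun x _ hx hnone => by cases hcov x hx hnone⟩
    · rw [if_neg hre]
      rcases hpp : pvPass (PySem.Dict.mk C) rem m with ⟨m2, still2, prog2⟩
      obtain ⟨p1, p2, p3, p4, p5, p6, p7, p8, p9⟩ := pvPass_correct C cur K pre rem m good hnd hkeys m2 still2 prog2 hpp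
      dsimp only
      cases prog2 with
      | true =>
        rw [if_pos rfl]
        refine ih still2 m2 p2 (p3.nodup hnd) ?_ ?_ ?_
        · intro x hx
          exact ⟨p6 x hx, (hkeys x (p3.subset hx)).2⟩
        · have := p8 rfl
          omega
        · intro k hk hnone
          have hmk : m.get? k = none := by
            cases hm : m.get? k with
            | none => rfl
            | some v => rw [p1 k v hm] at hnone; cases hnone
          have hkrem : k ∈ rem := hcov k hk hmk
          by_contra hns
          exact (p5 k hkrem hns) hnone
      | false =>
        rw [if_neg (by simp)]
        obtain ⟨he, hs⟩ := p7 rfl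
        subst he
        refine ⟨good, ?_⟩
        intro x hxR hxkey hxnone
        -- a μ-minimal reachable unfilled key would have been ready, hence filled: contradiction
        have hBad : (pvRset C cur K |>.filter (fun y => decide ((PySem.Dict.mk C).get? y ≠ none) && decide (m2.get? y = none))).Nonempty := by
          refine ⟨x, Finset.mem_filter.2 ⟨hxR, ?_⟩⟩
          simp [hxkey, hxnone]
        obtain ⟨n, hnBad, hnmin⟩ := Finset.exists_min_image _ (pvMu C cur K) hBad
        obtain ⟨hnR, hnprops⟩ := Finset.mem_filter.1 hnBad
        have hnkey : (PySem.Dict.mk C).get? n ≠ none := by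
          simp only [Bool.and_eq_true, decide_eq_true_eq] at hnprops
          exact hnprops.1
        have hnnone : m2.get? n = none := by
          simp only [Bool.and_eq_true, decide_eq_true_eq] at hnprops
          exact hnprops.2
        obtain ⟨cs, hcs⟩ : ∃ cs, (PySem.Dict.mk C).get? n = some cs := by
          cases hcc : (PySem.Dict.mk C).get? n with
          | none => exact absurd hcc hnkey
          | some cs => exact ⟨cs, rfl⟩
        have hkd : (PySem.Dict.mk K).get? n = none := pv_mono_none K good.1 hnnone
        have hsucc : pvSucc C K n = cs := pv_succ_eq_children C K hkd hcs
        have hready : pvReadyM C m2 n := by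
          intro c hcm
          rw [hcs] at hcm
          simp only [Option.getD_some] at hcm
          have hsc : c ∈ pvSucc C K n := by rw [hsucc]; exact hcm
          have hcR : c ∈ pvRset C cur K := pv_R_closed C cur K hnR hsc
          cases hmc : m2.get? c with
          | some v => simp [pvChildVal?, hmc]
          | none =>
            cases hcc : (PySem.Dict.mk C).get? c with
            | none =>
              have hcf : (PySem.Dict.mk C).contains c = false := by
                rw [PySem.Dict.contains_eq_isSome_get?, hcc]; rfl
              simp [pvChildVal?, hmc, hcf]
            | some _ =>
              exfalso
              have hcBad : c ∈ (pvRset C cur K |>.filter (fun y => decide ((PySem.Dict.mk C).get? y ≠ none) && decide (m2.get? y = none))) := by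
                refine Finset.mem_filter.2 ⟨hcR, ?_⟩
                simp [hcc, hmc]
              have h1 := hnmin c hcBad
              have h2 := pv_mu_lt C cur K pre hnR hsc
              omega
        have hnrem : n ∈ rem := hcov n hnkey hnnone
        have := p9 n hnrem hready
        rw [hs] at this
        exact this hnrem

theorem pvB_eq_val (C : List (String × List String)) (cur : String) (K : List (String × Int × Int × Int × Int)) (pre : Pre_count_paths_to_reactor C cur K) :
    count_paths_to_reactor_alt C cur K = pvVal C cur K cur := by
  have good0 : pvGood C cur K (PySem.Dict.mk K) := ⟨fun k v h => h, fun k v h => Or.inl h⟩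
  have hkeysmk : (PySem.Dict.mk C).keys = C.map Prod.fst := by
    simp [PySem.Dict.keys_mk]
  have hnd : ((PySem.Dict.mk C).keys.filter (fun k => !((PySem.Dict.mk K).contains k))).Nodup := by
    rw [hkeysmk]
    exact pre.1.filter _
  have hkeys : ∀ x ∈ (PySem.Dict.mk C).keys.filter (fun k => !((PySem.Dict.mk K).contains k)),
      (PySem.Dict.mk K).get? x = none ∧ (PySem.Dict.mk C).get? x ≠ none := by
    intro x hx
    have hx' := List.mem_filter.1 hx
    constructor
    · have hxc : ((PySem.Dict.mk K).contains x) = false := by simpa using hx'.2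
      rw [PySem.Dict.contains_eq_isSome_get?] at hxc
      cases h : (PySem.Dict.mk K).get? x with
      | none => rfl
      | some v => rw [h] at hxc; cases hxc
    · intro hnone
      exact (PySem.Dict.get?_eq_none_iff_not_mem_keys _ _).1 hnone hx'.1
  have hcov : ∀ k, (PySem.Dict.mk C).get? k ≠ none → (PySem.Dict.mk K).get? k = none →
      k ∈ (PySem.Dict.mk C).keys.filter (fun k => !((PySem.Dict.mk K).contains k)) := by
    intro k hk hnone
    refine List.mem_filter.2 ⟨?_, ?_⟩
    · by_contra hmem
      exact hk ((PySem.Dict.get?_eq_none_iff_not_mem_keys _ _).2 hmem)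
    · simp [PySem.Dict.contains_eq_isSome_get?, hnone]
  obtain ⟨goodf, hcomp⟩ := pvLoop_correct C cur K pre
    (((PySem.Dict.mk C).keys.filter (fun k => !((PySem.Dict.mk K).contains k))).length)
    ((PySem.Dict.mk C).keys.filter (fun k => !((PySem.Dict.mk K).contains k)))
    (PySem.Dict.mk K) good0 hnd hkeys le_rfl hcov
  unfold count_paths_to_reactor_alt
  dsimp only
  cases hget : (pvLoop (PySem.Dict.mk C)
      (((PySem.Dict.mk C).keys.filter (fun k => !((PySem.Dict.mk K).contains k))).length)
      ((PySem.Dict.mk C).keys.filter (fun k => !((PySem.Dict.mk K).contains k)))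
      (PySem.Dict.mk K)).get? cur with
  | some v =>
    exact pv_good_val C cur K goodf hget (pv_R_self C cur K)
  | none =>
    have hkdcur : (PySem.Dict.mk K).get? cur = none := pv_mono_none K goodf.1 hget
    have hckey : (PySem.Dict.mk C).get? cur = none := by
      by_contra hk
      exact (hcomp cur (pv_R_self C cur K) hk) hget
    have hcont : (PySem.Dict.mk C).contains cur = false := by
      rw [PySem.Dict.contains_eq_isSome_get?, hckey]; rfl
    rw [hcont]
    simp
    exact (pv_val_leaf C cur K hkdcur hckey).symm
-- ===== VERDICT (by name: the statement is the Claim_ definition above) =====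
theorem count_paths_to_reactor_spec : Claim_equal_count_paths_to_reactor := by
  intro connections current_device known_paths _dom pre
  unfold Spec_count_paths_to_reactor
  rw [pvA_eq_val connections current_device known_paths pre,
    pvB_eq_val connections current_device known_paths pre]
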